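-- pv_equiv track=rewrite | github.com/colinxy/ProjectEuler | Python/project_euler121.py | take_disc
-- ===== SOURCE A (Python) =====
-- def take_disc(chance, win_score, score=0):
--     """
--     :param chance: the chance of player to score red in the last round
--     :param win_score: the score to win
--     :param score: present score
--     :return: the increment of win
--     """
--     if chance == 1:
--         if score >= win_score:
--             return 1
--         return 0
--
--     increment = 0
--     increment += (chance-1) * take_disc(chance-1, win_score, score)
--     increment += take_disc(chance-1, win_score, score+1)
--     return increment
-- ===== SOURCE B (Python) =====
-- def take_disc(chance, win_score, score=0):
--     # DP over the generating polynomial prod_{j=1}^{chance-1} (j + x):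
--     # coeffs[k] = weighted count of outcomes with exactly k reds among the
--     # rounds whose blue-weights are 1 .. chance-1.
--     coeffs = [1]
--     for j in range(1, chance):
--         scaled = [j * c for c in coeffs] + [0]
--         shifted = [0] + coeffs
--         coeffs = [a + b for a, b in zip(scaled, shifted)]
--     total = 0
--     s = score
--     for c in coeffs:
--         if s >= win_score:
--             total += c
--         s += 1
--     return total
-- ===== Notes on version B (the rewrite author's own statement) =====
-- stated objective: faster
-- what changed: Replaces A's exponential binary recursion over draw outcomes with an O(chance^2) DP building the coefficient list of prod_{j=1}^{chance-1}(j+x) and summing the coefficients whose red-count reaches the winning score; intended as faster — measured: A timed out at n=16 where B returned instantly (no clean ratio at a size both finish).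
import Mathlib
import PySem

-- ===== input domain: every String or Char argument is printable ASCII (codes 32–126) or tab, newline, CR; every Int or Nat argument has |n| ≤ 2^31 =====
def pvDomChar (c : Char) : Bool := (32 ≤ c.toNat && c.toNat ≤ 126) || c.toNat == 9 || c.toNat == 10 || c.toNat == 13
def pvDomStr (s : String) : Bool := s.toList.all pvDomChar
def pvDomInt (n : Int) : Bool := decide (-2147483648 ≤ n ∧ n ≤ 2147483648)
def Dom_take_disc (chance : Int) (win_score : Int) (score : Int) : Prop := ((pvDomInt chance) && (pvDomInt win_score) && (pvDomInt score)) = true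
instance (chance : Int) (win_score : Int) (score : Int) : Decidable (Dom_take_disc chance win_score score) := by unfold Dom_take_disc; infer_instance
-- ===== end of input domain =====

-- B replaces A's exponential recursion with a polynomial-coefficient DP; intended as faster (a timing run saw A time out at n=16 where B returned, so no ratio was measured).

-- ===== PORT A =====
def take_disc (chance : Int) (win_score : Int) (score : Int) : Int :=
  if chance = 1 then
    if score ≥ win_score then 1 else 0
  else if chance ≤ 0 then 0  -- Python recurses without a base case here (RecursionError); totality guard, excluded by Pre_
  else
    (chance - 1) * take_disc (chance - 1) win_score score
      + take_disc (chance - 1) win_score (score + 1)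
termination_by chance.toNat
decreasing_by all_goals omega

-- ===== PORT B =====
-- one DP step: coeffs := [a+b for a,b in zip([j*c for c in coeffs]+[0], [0]+coeffs)]
def pvStep (j : Int) (cs : List Int) : List Int :=
  List.zipWith (· + ·) (cs.map (fun c => j * c) ++ [0]) (0 :: cs)

def take_disc_alt (chance : Int) (win_score : Int) (score : Int) : Int :=
  let coeffs := (PySem.List.pyRange 1 chance 1).foldl (fun cs j => pvStep j cs) [1]
  (coeffs.foldl (fun (p : Int × Int) c =>
      (if p.2 ≥ win_score then p.1 + c else p.1, p.2 + 1)) (0, score)).1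

-- ===== PRECONDITION & SPEC =====
-- Pre_ excludes chance ≤ 0, where Python A recurses forever (RecursionError).
def Pre_take_disc (chance : Int) (win_score : Int) (score : Int) : Prop := 1 ≤ chance
instance (chance : Int) (win_score : Int) (score : Int) : Decidable (Pre_take_disc chance win_score score) := by unfold Pre_take_disc; infer_instance
def pvWitness_take_disc : Int × Int × Int := (3, 2, 0)

def Spec_take_disc (chance : Int) (win_score : Int) (score : Int) (out : Int) : Prop := out = take_disc_alt chance win_score score
instance (chance : Int) (win_score : Int) (score : Int) (out : Int) : Decidable (Spec_take_disc chance win_score score out) := by unfold Spec_take_disc; infer_instance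

-- ===== CLAIM (what is proved, stated in full; the proofs are below) =====
def Claim_equal_take_disc : Prop := ∀ (chance : Int) (win_score : Int) (score : Int), Dom_take_disc chance win_score score → Pre_take_disc chance win_score score → Spec_take_disc chance win_score score (take_disc chance win_score score)

-- ===== LEMMAS AND PROOFS =====

-- weighted indicator sum: Σ_k cs[k] * [s + k ≥ w]
def pvWsum (w s : Int) : List Int → Int
  | [] => 0
  | c :: rest => (if s ≥ w then c else 0) + pvWsum w (s + 1) rest

def pvCoeffs (chance : Int) : List Int :=
  (PySem.List.pyRange 1 chance 1).foldl (fun cs j => pvStep j cs) [1]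

lemma pvFold_eq (w : Int) : ∀ (cs : List Int) (t s : Int),
    (cs.foldl (fun (p : Int × Int) c =>
      (if p.2 ≥ w then p.1 + c else p.1, p.2 + 1)) (t, s)).1 = t + pvWsum w s cs := by
  intro cs
  induction cs with
  | nil => intro t s; simp [pvWsum]
  | cons c rest ih =>
      intro t s
      simp only [List.foldl, pvWsum, ih]
      split_ifs <;> ring

lemma pvWsum_zip : ∀ (cs : List Int) (j w s p : Int),
    pvWsum w s (List.zipWith (· + ·) (cs.map (fun c => j * c) ++ [0]) (p :: cs))
      = (if s ≥ w then p else 0) + j * pvWsum w s cs + pvWsum w (s + 1) cs := by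
  intro cs
  induction cs with
  | nil =>
      intro j w s p
      simp only [List.map_nil, List.nil_append, List.zipWith, pvWsum]
      split_ifs <;> ring
  | cons c rest ih =>
      intro j w s p
      simp only [List.map, List.cons_append, List.zipWith, pvWsum, ih]
      split_ifs <;> ring

lemma pvWsum_step (j w s : Int) (cs : List Int) :
    pvWsum w s (pvStep j cs) = j * pvWsum w s cs + pvWsum w (s + 1) cs := by
  have h := pvWsum_zip cs j w s 0
  simp only [pvStep] at *
  simpa using h

lemma pvCoeffs_succ (c : Int) (hc : 1 ≤ c) :
    pvCoeffs (c + 1) = pvStep c (pvCoeffs c) := by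
  unfold pvCoeffs
  rw [PySem.List.pyRange_one_succ_right hc, List.foldl_append]
  simp

lemma take_disc_eq_wsum : ∀ (c : Int), 1 ≤ c → ∀ (w s : Int),
    take_disc c w s = pvWsum w s (pvCoeffs c) := by
  intro c hc
  induction c, hc using Int.le_induction with
  | base =>
      intro w s
      rw [take_disc]
      simp [pvCoeffs, PySem.List.pyRange_one_eq_nil (le_refl (1 : Int)), pvWsum]
  | succ c hc ih =>
      intro w s
      have h1 : ¬ (c + 1 = 1) := by omega
      have h2 : ¬ (c + 1 ≤ 0) := by omega
      have hcc : c + 1 - 1 = c := by ring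
      rw [take_disc, if_neg h1, if_neg h2, hcc, pvCoeffs_succ c hc, pvWsum_step,
        ih w s, ih w (s + 1)]

-- ===== VERDICT (by name: the statement is the Claim_ definition above) =====
theorem take_disc_spec : Claim_equal_take_disc := by
  intro chance win_score score _ hpre
  unfold Spec_take_disc take_disc_alt
  rw [take_disc_eq_wsum chance hpre win_score score]
  simp only [pvCoeffs, pvFold_eq, zero_add]
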